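-- pv_equiv track=rewrite | github.com/iljung1106/ArtistEmbeddingClassifier | train_style_ddp.py | _pick_from_schedule
-- ===== SOURCE A (Python) =====
-- def _pick_from_schedule(sched, default_val, ep):
--     if not sched:
--         return int(default_val)
--     if isinstance(sched, dict):
--         items = sorted([(int(k), int(v)) for k,v in sched.items()], key=lambda x: x[0])
--     else:
--         items = sorted([(int(k), int(v)) for k,v in sched], key=lambda x: x[0])
--     val = int(default_val)
--     for k,v in items:
--         if ep >= k:
--             val = int(v)
--     return int(val)
-- ===== SOURCE B (Python) =====
-- def _pick_from_schedule(sched, default_val, ep):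
--     # Single linear pass, no sort: track the largest key <= ep seen so far
--     # (>= so that among duplicate maximal keys the last entry wins, like the
--     # stable sort's last-overwrite in the original).
--     if not sched:
--         return int(default_val)
--     items = sched.items() if isinstance(sched, dict) else sched
--     best_k = None
--     best_v = int(default_val)
--     for k, v in items:
--         k = int(k)
--         v = int(v)
--         if ep >= k and (best_k is None or k >= best_k):
--             best_k = k
--             best_v = v
--     return int(best_v)
-- ===== Notes on version B (the rewrite author's own statement) =====
-- stated objective: faster
-- what changed: Replaced A's build-sorted-copy-then-scan-all with a single linear pass that keeps the best (largest, last-wins) key <= ep and its value, so no sort happens at all.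
import Mathlib
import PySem

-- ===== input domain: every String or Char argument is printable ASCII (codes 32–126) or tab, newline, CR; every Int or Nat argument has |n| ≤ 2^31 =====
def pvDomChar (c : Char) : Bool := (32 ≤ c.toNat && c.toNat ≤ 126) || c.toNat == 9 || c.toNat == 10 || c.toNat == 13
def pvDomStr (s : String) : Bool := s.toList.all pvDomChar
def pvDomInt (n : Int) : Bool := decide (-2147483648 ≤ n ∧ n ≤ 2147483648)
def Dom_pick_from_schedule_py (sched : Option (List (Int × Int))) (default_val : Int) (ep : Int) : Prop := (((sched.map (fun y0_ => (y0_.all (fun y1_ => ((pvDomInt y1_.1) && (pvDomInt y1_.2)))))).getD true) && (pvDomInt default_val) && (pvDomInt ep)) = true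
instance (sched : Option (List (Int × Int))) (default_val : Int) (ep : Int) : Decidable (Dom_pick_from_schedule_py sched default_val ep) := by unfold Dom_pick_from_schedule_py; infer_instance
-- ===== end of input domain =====

-- B replaces A's sort-then-scan with a single linear pass tracking the largest key ≤ ep (last wins on ties): O(n) instead of O(n^2) sorting work.

-- ===== PORT A =====
-- A: if not sched return default; sort items by key (stable); overwrite val for every k ≤ ep.
def pick_from_schedule_py (sched : Option (List (Int × Int))) (default_val : Int) (ep : Int) : Int :=
  match sched with
  | none => default_val
  | some s =>
    if s = [] then default_val
    else
      let items := PySem.List.sorted s (fun x => x.1)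
      items.foldl (fun val kv => if ep ≥ kv.1 then kv.2 else val) default_val

-- ===== PORT B =====
-- one fold step of B's loop body: state = (best_k : Option Int, best_v : Int)
def pickAltStep (ep : Int) (st : Option Int × Int) (kv : Int × Int) : Option Int × Int :=
  if decide (ep ≥ kv.1) && (match st.1 with | none => true | some bk => decide (kv.1 ≥ bk)) then
    (some kv.1, kv.2)
  else st

def pick_from_schedule_py_alt (sched : Option (List (Int × Int))) (default_val : Int) (ep : Int) : Int :=
  match sched with
  | none => default_val
  | some s =>
    if s = [] then default_val
    else (s.foldl (pickAltStep ep) (none, default_val)).2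

-- ===== PRECONDITION & SPEC =====
def Spec_pick_from_schedule_py (sched : Option (List (Int × Int))) (default_val : Int) (ep : Int) (out : Int) : Prop := out = pick_from_schedule_py_alt sched default_val ep
instance (sched : Option (List (Int × Int))) (default_val : Int) (ep : Int) (out : Int) : Decidable (Spec_pick_from_schedule_py sched default_val ep out) := by unfold Spec_pick_from_schedule_py; infer_instance

-- ===== CLAIM (what is proved, stated in full; the proofs are below) =====
def Claim_equal_pick_from_schedule_py : Prop := ∀ (sched : Option (List (Int × Int))) (default_val : Int) (ep : Int), Dom_pick_from_schedule_py sched default_val ep → Spec_pick_from_schedule_py sched default_val ep (pick_from_schedule_py sched default_val ep)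

-- ===== LEMMAS AND PROOFS =====

-- unfolding equation for PySem's insertBy on a cons cell
theorem insertBy_cons {α : Type} (before : α → α → Bool) (x y : α) (ys : List α) :
    PySem.List.insertBy before x (y :: ys)
      = if before x y then x :: y :: ys else y :: PySem.List.insertBy before x ys := rfl

-- B's step commutes past any element with a strictly larger key.
theorem pickAltStep_swap (ep : Int) (st : Option Int × Int) (x y : Int × Int)
    (h : x.1 < y.1) :
    pickAltStep ep (pickAltStep ep st x) y = pickAltStep ep (pickAltStep ep st y) x := by
  rcases st with ⟨bk, bv⟩
  by_cases hx : ep ≥ x.1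
  · by_cases hy : ep ≥ y.1
    · rcases bk with _ | k
      · simp [pickAltStep, hx, hy, h.le, not_le.mpr h]
      · by_cases hkx : x.1 ≥ k
        · have hky : y.1 ≥ k := le_trans hkx h.le
          simp [pickAltStep, hx, hy, hkx, hky, h.le, not_le.mpr h]
        · by_cases hky : y.1 ≥ k
          · simp [pickAltStep, hx, hy, hkx, hky, not_le.mpr h]
          · simp [pickAltStep, hx, hy, hkx, hky]
    · rcases bk with _ | k
      · simp [pickAltStep, hx, hy]
      · by_cases hkx : x.1 ≥ k <;> simp [pickAltStep, hx, hy, hkx]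
  · by_cases hy : ep ≥ y.1
    · rcases bk with _ | k
      · simp [pickAltStep, hx, hy]
      · by_cases hky : y.1 ≥ k <;> simp [pickAltStep, hx, hy, hky]
    · simp [pickAltStep, hx, hy]

-- B's step slides from the front to the back of a fold over elements with strictly larger keys.
theorem foldl_pickAltStep_comm (ep : Int) (x : Int × Int) :
    ∀ (L : List (Int × Int)), (∀ y ∈ L, x.1 < y.1) → ∀ st,
    L.foldl (pickAltStep ep) (pickAltStep ep st x)
      = pickAltStep ep (L.foldl (pickAltStep ep) st) x := by
  intro L
  induction L with
  | nil => intro _ st; rfl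
  | cons y ys ih =>
    intro h st
    simp only [List.foldl_cons]
    rw [pickAltStep_swap ep st x y (h y (by simp))]
    exact ih (fun z hz => h z (by simp [hz])) _

-- Inserting x into a key-sorted list and folding B's step = folding over the list, then stepping x.
theorem foldl_insertBy_pickAltStep (ep : Int) (x : Int × Int) :
    ∀ (L : List (Int × Int)), L.Pairwise (fun a b => a.1 ≤ b.1) → ∀ st,
    (PySem.List.insertBy (fun a b => decide (a.1 < b.1)) x L).foldl (pickAltStep ep) st
      = pickAltStep ep (L.foldl (pickAltStep ep) st) x := by
  intro L
  induction L with
  | nil => intro _ st; rfl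
  | cons y ys ih =>
    intro hp st
    rw [List.pairwise_cons] at hp
    by_cases hlt : x.1 < y.1
    · rw [insertBy_cons, if_pos (by simpa using hlt)]
      simp only [List.foldl_cons]
      exact foldl_pickAltStep_comm ep x (y :: ys)
        (by intro z hz; rcases List.mem_cons.mp hz with h | h
            · exact h ▸ hlt
            · exact lt_of_lt_of_le hlt (hp.1 z h)) st
    · rw [insertBy_cons, if_neg (by simpa using hlt)]
      simp only [List.foldl_cons]
      exact ih hp.2 _

-- B's fold is invariant under Python's stable sort by key.
theorem foldl_pickAltStep_sorted (ep : Int) (s : List (Int × Int)) (st : Option Int × Int) :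
    (PySem.List.sorted s (fun x => x.1)).foldl (pickAltStep ep) st
      = s.foldl (pickAltStep ep) st := by
  induction s using List.reverseRecOn generalizing st with
  | nil => rfl
  | append_singleton t x ih =>
    rw [PySem.List.sorted_eq_foldl_insertBy, List.foldl_append, List.foldl_append,
      ← PySem.List.sorted_eq_foldl_insertBy]
    simp only [List.foldl_cons, List.foldl_nil]
    rw [foldl_insertBy_pickAltStep ep x _ (PySem.List.sorted_pairwise t (fun x => x.1)) st, ih]

-- On a key-sorted list whose keys all dominate the stored best key, A's overwrite fold equals B's fold.
theorem foldl_A_eq_B (ep : Int) :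
    ∀ (L : List (Int × Int)), L.Pairwise (fun a b => a.1 ≤ b.1) →
    ∀ (st : Option Int × Int), (∀ kv ∈ L, ∀ k, st.1 = some k → k ≤ kv.1) →
    L.foldl (fun val kv => if ep ≥ kv.1 then kv.2 else val) st.2
      = (L.foldl (pickAltStep ep) st).2 := by
  intro L
  induction L with
  | nil => intro _ st _; rfl
  | cons y ys ih =>
    intro hp st hinv
    rw [List.pairwise_cons] at hp
    simp only [List.foldl_cons]
    have hstep : (if ep ≥ y.1 then y.2 else st.2) = (pickAltStep ep st y).2 := by
      unfold pickAltStep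
      rcases hst : st.1 with _ | k
      · split_ifs <;> simp_all <;> omega
      · have := hinv y (by simp) k hst
        split_ifs <;> simp_all <;> omega
    rw [hstep]
    refine ih hp.2 _ ?_
    intro kv hkv k hk
    have h2 : y.1 ≤ kv.1 := hp.1 kv hkv
    unfold pickAltStep at hk
    split_ifs at hk with hc
    · simp at hk; omega
    · have := hinv kv (by simp [hkv]) k hk
      exact this

-- ===== VERDICT (by name: the statement is the Claim_ definition above) =====
theorem pick_from_schedule_py_spec : Claim_equal_pick_from_schedule_py := by
  intro sched d ep _
  unfold Spec_pick_from_schedule_py pick_from_schedule_py pick_from_schedule_py_alt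
  rcases sched with _ | s
  · rfl
  · simp only
    by_cases hs : s = []
    · simp [hs]
    · simp only [if_neg hs]
      rw [foldl_A_eq_B ep (PySem.List.sorted s (fun x => x.1))
        (PySem.List.sorted_pairwise s (fun x => x.1)) (none, d) (by simp),
        foldl_pickAltStep_sorted]
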